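-- pv_equiv track=rewrite | github.com/Bomtori/NoteRi | backend/services/diarization.py | _best_label_for_segment
-- ===== SOURCE A (Python) =====
-- def _best_label_for_segment(s_ms:int, e_ms:int, diar_turns):
--     # diar_turns: list[(ts_ms, te_ms, model_key)]
--     best_label, best_ov = "U", -1
--     for ts,te,label in diar_turns:
--         ov = max(0, min(e_ms, te) - max(s_ms, ts))
--         if ov > best_ov:
--             best_label, best_ov = label, ov
--     if best_ov <= 0:
--         # 겹침 없으면 "가장 가까운 턴"의 라벨
--         closest = min(diar_turns, key=lambda t: min(abs(s_ms - t[0]), abs(e_ms - t[1])))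
--         return closest[2]
--     return best_label
-- ===== SOURCE B (Python) =====
-- def _best_label_for_segment(s_ms: int, e_ms: int, diar_turns):
--     # Sort-based selection: stable-sort by descending overlap and take the head
--     # (first-wins on ties, like A's strict-update scan); if that best overlap is
--     # not positive, sort by closeness and take the head (= min(), first-wins).
--     def overlap(t):
--         return max(0, min(e_ms, t[1]) - max(s_ms, t[0]))
--
--     def closeness(t):
--         return min(abs(s_ms - t[0]), abs(e_ms - t[1]))
--
--     top = sorted(diar_turns, key=overlap, reverse=True)[0]  # IndexError on []
--     if overlap(top) > 0:
--         return top[2]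
--     return sorted(diar_turns, key=closeness)[0][2]
-- ===== Notes on version B (the rewrite author's own statement) =====
-- stated objective: alternative
-- what changed: B replaces A's running-maximum scan plus min(..., key=...) fallback with sort-based selection: stable-sort by descending overlap and take the head, falling back to the head of a sort by closeness.
import Mathlib
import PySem

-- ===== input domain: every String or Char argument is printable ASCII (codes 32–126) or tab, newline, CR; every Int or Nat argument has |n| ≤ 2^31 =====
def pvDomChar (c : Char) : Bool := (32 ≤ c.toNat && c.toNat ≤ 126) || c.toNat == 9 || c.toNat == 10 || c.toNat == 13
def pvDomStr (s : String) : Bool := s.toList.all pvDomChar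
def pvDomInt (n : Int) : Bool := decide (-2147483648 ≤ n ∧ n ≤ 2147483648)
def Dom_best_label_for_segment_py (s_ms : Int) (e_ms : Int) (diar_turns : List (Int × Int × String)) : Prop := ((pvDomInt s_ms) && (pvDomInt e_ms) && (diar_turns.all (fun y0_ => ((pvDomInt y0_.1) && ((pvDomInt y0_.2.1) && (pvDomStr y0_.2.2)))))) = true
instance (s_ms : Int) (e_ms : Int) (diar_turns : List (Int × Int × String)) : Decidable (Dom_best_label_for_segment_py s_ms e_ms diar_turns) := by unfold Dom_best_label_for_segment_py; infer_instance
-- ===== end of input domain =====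

-- B replaces A's running-maximum scan (plus a separate min(..., key=...) pass) with
-- sort-based selection: stable-sort by descending overlap and take the head; if that
-- best overlap is not positive, take the head of a sort by closeness (alternative).

-- ===== PORT A =====
-- overlap-loop step of A: if ov > best_ov then take (label, ov)
def pvAStep (s_ms e_ms : Int) (st : String × Int) (t : Int × Int × String) : String × Int :=
  let ov := max 0 (min e_ms t.2.1 - max s_ms t.1)
  if st.2 < ov then (t.2.2, ov) else st

def best_label_for_segment_py (s_ms : Int) (e_ms : Int) (diar_turns : List (Int × Int × String)) : String :=
  let st := diar_turns.foldl (pvAStep s_ms e_ms) ("U", -1)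
  if st.2 ≤ 0 then
    -- min(diar_turns, key=lambda t: min(abs(s_ms-t[0]), abs(e_ms-t[1]))); raises ValueError on []
    match PySem.List.min? diar_turns (fun t => min |s_ms - t.1| |e_ms - t.2.1|) with
    | some m => m.2.2
    | none => "U"   -- unreachable under Pre_ (Python raises ValueError here)
  else st.1

-- ===== PORT B =====
def pvOverlap (s_ms e_ms : Int) (t : Int × Int × String) : Int :=
  max 0 (min e_ms t.2.1 - max s_ms t.1)

def pvCloseness (s_ms e_ms : Int) (t : Int × Int × String) : Int :=
  min |s_ms - t.1| |e_ms - t.2.1|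

def best_label_for_segment_py_alt (s_ms : Int) (e_ms : Int) (diar_turns : List (Int × Int × String)) : String :=
  -- sorted(diar_turns, key=overlap, reverse=True)[0]
  match PySem.List.pyGet? (PySem.List.sorted diar_turns (pvOverlap s_ms e_ms) true) 0 with
  | none => "U"   -- unreachable under Pre_ (Python raises IndexError here)
  | some top =>
    if 0 < pvOverlap s_ms e_ms top then top.2.2
    else
      -- sorted(diar_turns, key=closeness)[0][2]
      match PySem.List.pyGet? (PySem.List.sorted diar_turns (pvCloseness s_ms e_ms) false) 0 with
      | none => "U"   -- unreachable under Pre_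
      | some m => m.2.2

-- ===== PRECONDITION & SPEC =====
-- Pre_ excludes only the empty list, on which Python A raises ValueError (min() of empty sequence).
def Pre_best_label_for_segment_py (s_ms : Int) (e_ms : Int) (diar_turns : List (Int × Int × String)) : Prop :=
  diar_turns ≠ []
instance (s_ms : Int) (e_ms : Int) (diar_turns : List (Int × Int × String)) : Decidable (Pre_best_label_for_segment_py s_ms e_ms diar_turns) := by unfold Pre_best_label_for_segment_py; infer_instance

def pvWitness_best_label_for_segment_py : Int × Int × (List (Int × Int × String)) := (0, 1, [(0, 1, "A")])

def Spec_best_label_for_segment_py (s_ms : Int) (e_ms : Int) (diar_turns : List (Int × Int × String)) (out : String) : Prop := out = best_label_for_segment_py_alt s_ms e_ms diar_turns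
instance (s_ms : Int) (e_ms : Int) (diar_turns : List (Int × Int × String)) (out : String) : Decidable (Spec_best_label_for_segment_py s_ms e_ms diar_turns out) := by unfold Spec_best_label_for_segment_py; infer_instance

-- ===== CLAIM (what is proved, stated in full; the proofs are below) =====
def Claim_equal_best_label_for_segment_py : Prop := ∀ (s_ms : Int) (e_ms : Int) (diar_turns : List (Int × Int × String)), Dom_best_label_for_segment_py s_ms e_ms diar_turns → Pre_best_label_for_segment_py s_ms e_ms diar_turns → Spec_best_label_for_segment_py s_ms e_ms diar_turns (best_label_for_segment_py s_ms e_ms diar_turns)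

-- ===== LEMMAS AND PROOFS =====

-- head of insertBy, in terms of the head of the old list
theorem pv_head_insertBy {α : Type} (bf : α → α → Bool) (x : α) (l : List α) :
    (PySem.List.insertBy bf x l).head? =
      match l.head? with
      | none => some x
      | some y => if bf x y then some x else some y := by
  cases l with
  | nil => rfl
  | cons y ys => simp only [PySem.List.insertBy]; split <;> simp_all

-- head of an insertBy-fold is the corresponding option-fold of the heads
theorem pv_head_foldl_insertBy {α : Type} (bf : α → α → Bool) (l : List α) (acc : List α) :
    (l.foldl (fun acc x => PySem.List.insertBy bf x acc) acc).head? =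
      l.foldl (fun o x =>
        match o with
        | none => some x
        | some y => if bf x y then some x else some y) acc.head? := by
  induction l generalizing acc with
  | nil => rfl
  | cons h t ih =>
    simp only [List.foldl_cons]
    rw [ih, pv_head_insertBy]

-- head of the ascending sort IS min? (first minimal element)
theorem pv_head_sorted_min (s_ms e_ms : Int) (l : List (Int × Int × String)) :
    (PySem.List.sorted l (pvCloseness s_ms e_ms) false).head? =
      PySem.List.min? l (pvCloseness s_ms e_ms) := by
  simp only [PySem.List.sorted, PySem.List.min?]
  rw [pv_head_foldl_insertBy]
  apply PySem.List.foldl_congr_mem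
  intro acc x _
  cases acc <;> simp

-- total running-"first maximum" over the turns
def pvRunMax (s_ms e_ms : Int) (m : Int × Int × String) (l : List (Int × Int × String)) :
    Int × Int × String :=
  l.foldl (fun m x => if pvOverlap s_ms e_ms m < pvOverlap s_ms e_ms x then x else m) m

-- generic: the head-option fold of "keep y if bf y z" over some x is a total fold
theorem pv_optfold {α : Type} (bf : α → α → Bool) (t : List α) (x : α) :
    (t.foldl (fun o y =>
        match o with
        | none => some y
        | some z => if bf y z then some y else some z) (some x))
      = some (t.foldl (fun m y => if bf y m then y else m) x) := by
  induction t generalizing x with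
  | nil => rfl
  | cons h t ih =>
    cases hb : bf h x <;> simp only [List.foldl_cons, hb, if_true] <;>
      [exact ih x; exact ih h]

-- head of the descending sort is the running first-maximum
theorem pv_head_sorted_max (s_ms e_ms : Int) (x : Int × Int × String)
    (t : List (Int × Int × String)) :
    (PySem.List.sorted (x :: t) (pvOverlap s_ms e_ms) true).head? =
      some (pvRunMax s_ms e_ms x t) := by
  simp only [PySem.List.sorted]
  rw [pv_head_foldl_insertBy]
  simp only [List.foldl_cons, List.head?_nil]
  rw [pv_optfold]
  simp only [pvRunMax, Option.some.injEq]
  apply PySem.List.foldl_congr_mem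
  intro m y _
  simp

-- A's fold carries exactly (label, overlap) of the running first-maximum
theorem pv_afold_runmax (s_ms e_ms : Int) (m : Int × Int × String)
    (t : List (Int × Int × String)) :
    t.foldl (pvAStep s_ms e_ms) (m.2.2, pvOverlap s_ms e_ms m) =
      ((pvRunMax s_ms e_ms m t).2.2, pvOverlap s_ms e_ms (pvRunMax s_ms e_ms m t)) := by
  induction t generalizing m with
  | nil => rfl
  | cons h t ih =>
    simp only [List.foldl_cons, pvRunMax, pvAStep, pvOverlap]
    by_cases hc : pvOverlap s_ms e_ms m < pvOverlap s_ms e_ms h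
    · rw [if_pos (by simpa [pvOverlap] using hc), if_pos (by simpa [pvOverlap] using hc)]
      exact ih h
    · rw [if_neg (by simpa [pvOverlap] using hc), if_neg (by simpa [pvOverlap] using hc)]
      exact ih m

-- pyGet? at index 0 is head?
theorem pv_pyGet_zero {α : Type} (l : List α) : PySem.List.pyGet? l 0 = l.head? := by
  cases l <;> simp [PySem.List.pyGet?, PySem.List.pyIdx?]

-- ===== VERDICT (by name: the statement is the Claim_ definition above) =====
theorem best_label_for_segment_py_spec : Claim_equal_best_label_for_segment_py := by
  intro s_ms e_ms l _ hpre
  unfold Spec_best_label_for_segment_py best_label_for_segment_py best_label_for_segment_py_alt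
  obtain ⟨x, t, rfl⟩ : ∃ x t, l = x :: t := by
    cases l with
    | nil => exact absurd rfl hpre
    | cons x t => exact ⟨x, t, rfl⟩
  rw [pv_pyGet_zero, pv_head_sorted_max, pv_pyGet_zero, pv_head_sorted_min]
  have hfirst : (x :: t).foldl (pvAStep s_ms e_ms) ("U", -1) =
      t.foldl (pvAStep s_ms e_ms) (x.2.2, pvOverlap s_ms e_ms x) := by
    simp only [List.foldl_cons, pvAStep, pvOverlap]
    rw [if_pos (lt_of_lt_of_le (by norm_num) (le_max_left 0 _))]
  rw [hfirst, pv_afold_runmax]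
  set m := pvRunMax s_ms e_ms x t with hm
  by_cases hpos : 0 < pvOverlap s_ms e_ms m
  · simp [not_le.mpr hpos, hpos]
  · simp [not_lt.mp hpos, hpos]
    rw [show (fun t : Int × Int × String => min |s_ms - t.1| |e_ms - t.2.1|) =
          pvCloseness s_ms e_ms from rfl]
    cases PySem.List.min? (x :: t) (pvCloseness s_ms e_ms) <;> rfl
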